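-- pv_equiv track=rewrite | github.com/4d4mszweda/study | cryptography/vigenere_cipher.py | frequencyMatchScore
-- ===== SOURCE A (Python) =====
-- def frequencyMatchScore(str):
--     score = 0
--     ETAOIN = 'ETAOINSHRDLCUMWFGYPBVKJXQZ'
--     LETTERS = 'ABCDEFGHIJKLMNOPQRSTUVWXYZ'
--     sign_count_string = ''
--     sign_count_dict = countingItem(str)
--
--     freqToLetter = {}
--     for letter in LETTERS:
--         if sign_count_dict[letter] not in freqToLetter:
--             freqToLetter[sign_count_dict[letter]] = [letter]
--         else:
--             freqToLetter[sign_count_dict[letter]].append(letter)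
--
--     for freq in freqToLetter:
--         freqToLetter[freq].sort(key=ETAOIN.find, reverse=True)
--         freqToLetter[freq] = ''.join(freqToLetter[freq])
--
--     freqPairs = sorted(freqToLetter.items(), key=lambda x:x[0], reverse=True)
--
--     for next in freqPairs:
--         sign_count_string += next[1]
--
--     for commonLetter in ETAOIN[:6]:
--         if commonLetter in sign_count_string[:6]:
--             score += 1
--     for uncommonLetter in ETAOIN[-6:]:
--         if uncommonLetter in sign_count_string[-6:]:
--             score += 1
--     return score
--
-- def countingItem(str_data):
--     data_dict = {'A': 0, 'B': 0, 'C': 0, 'D': 0, 'E': 0, 'F': 0, 'G': 0, 'H': 0, 'I': 0, 'J': 0, 'K': 0, 'L': 0, 'M': 0, 'N': 0, 'O': 0, 'P': 0, 'Q': 0, 'R': 0, 'S': 0, 'T': 0, 'U': 0, 'V': 0, 'W': 0, 'X': 0, 'Y': 0, 'Z': 0}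
--     for word in str_data:
--         for letter in word.upper():
--             num = ord(letter)
--             if(num < 65 or (90 < num and num < 97) or 122 < num):
--                 continue
--             data_dict[letter] += 1
--     return data_dict
-- ===== SOURCE B (Python) =====
-- def frequencyMatchScore(str):
--     ETAOIN = 'ETAOINSHRDLCUMWFGYPBVKJXQZ'
--     LETTERS = 'ABCDEFGHIJKLMNOPQRSTUVWXYZ'
--     counts = {c: 0 for c in LETTERS}
--     for ch in str.upper():
--         if ch in counts:
--             counts[ch] += 1
--     order = ''.join(sorted(LETTERS, key=lambda l: 26 * counts[l] + ETAOIN.find(l), reverse=True))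
--     score = 0
--     for commonLetter in ETAOIN[:6]:
--         if commonLetter in order[:6]:
--             score += 1
--     for uncommonLetter in ETAOIN[-6:]:
--         if uncommonLetter in order[-6:]:
--             score += 1
--     return score
-- ===== Notes on version B (the rewrite author's own statement) =====
-- stated objective: simpler
-- what changed: Replaces the frequency-bucket dict, per-bucket reverse sort, pair sort and concatenation with one reverse sort of the alphabet by the combined key 26*count + ETAOIN-rank, and counts letters by uppercasing the text once and testing dict membership instead of per-character ord-range arithmetic.
import Mathlib
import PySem

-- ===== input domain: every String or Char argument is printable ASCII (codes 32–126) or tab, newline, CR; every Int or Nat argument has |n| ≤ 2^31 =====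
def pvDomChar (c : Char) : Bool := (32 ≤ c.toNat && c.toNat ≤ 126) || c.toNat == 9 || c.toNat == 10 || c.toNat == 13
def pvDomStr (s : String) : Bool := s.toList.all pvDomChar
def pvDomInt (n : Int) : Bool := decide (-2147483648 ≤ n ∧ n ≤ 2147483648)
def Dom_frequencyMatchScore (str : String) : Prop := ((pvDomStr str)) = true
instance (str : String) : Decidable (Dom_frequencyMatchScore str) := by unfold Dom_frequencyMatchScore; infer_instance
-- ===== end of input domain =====

-- B replaces A's frequency-bucket dict + per-bucket sort + pair sort + concatenation by one
-- reverse sort of the alphabet under the combined key 26*count + ETAOIN-rank (objective: simpler).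

-- ===== PORT A =====
-- The Python dict display {'A': 0, …, 'Z': 0} is written as a fold of inserts over its 26 keys;
-- data_dict[letter] += 1 is Dict.modify with default 0, exact because the key is always present
-- when the ord-range guard passes on an admitted (ASCII) input.
def countingItem (str_data : String) : PySem.Dict Char Int :=
  let data_dict : PySem.Dict Char Int :=
    "ABCDEFGHIJKLMNOPQRSTUVWXYZ".toList.foldl (fun d c => d.insert c 0) PySem.Dict.empty
  str_data.toList.foldl (fun d word =>
    (PySem.Chars.upper [word]).foldl (fun d letter =>
      if letter.toNat < 65 ∨ (90 < letter.toNat ∧ letter.toNat < 97) ∨ 122 < letter.toNat then d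
      else d.modify letter 0 (· + 1)) d) data_dict

-- ''.join over a bucket of single letters is the identity on the char list, so the dict values
-- stay List Char through the join step; iterating the dict iterates its key list (only existing
-- keys are reassigned, so the key order is fixed).
def frequencyMatchScore (str : String) : Int :=
  let score : Int := 0
  let ETAOIN := "ETAOINSHRDLCUMWFGYPBVKJXQZ".toList
  let LETTERS := "ABCDEFGHIJKLMNOPQRSTUVWXYZ".toList
  let sign_count_string : List Char := []
  let sign_count_dict := countingItem str
  let freqToLetter : PySem.Dict Int (List Char) :=
    LETTERS.foldl (fun d letter =>
      if d.contains (sign_count_dict.getD letter 0) = false then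
        d.insert (sign_count_dict.getD letter 0) [letter]
      else
        d.modify (sign_count_dict.getD letter 0) [] (fun v => v ++ [letter])) PySem.Dict.empty
  let freqToLetter2 :=
    freqToLetter.keys.foldl (fun d freq =>
      d.insert freq (PySem.List.sorted (d.getD freq []) (fun c => PySem.Chars.find ETAOIN [c]) true)) freqToLetter
  let freqPairs := PySem.List.sorted freqToLetter2.items (fun x => x.1) true
  let sign_count_string := freqPairs.foldl (fun acc next => acc ++ next.2) sign_count_string
  let score := (PySem.List.slice ETAOIN none (some 6)).foldl
    (fun sc commonLetter =>
      if PySem.Chars.isIn [commonLetter] (PySem.List.slice sign_count_string none (some 6)) then sc + 1 else sc) score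
  let score := (PySem.List.slice ETAOIN (some (-6)) none).foldl
    (fun sc uncommonLetter =>
      if PySem.Chars.isIn [uncommonLetter] (PySem.List.slice sign_count_string (some (-6)) none) then sc + 1 else sc) score
  score

-- ===== PORT B =====
def frequencyMatchScore_alt (str : String) : Int :=
  let ETAOIN := "ETAOINSHRDLCUMWFGYPBVKJXQZ".toList
  let LETTERS := "ABCDEFGHIJKLMNOPQRSTUVWXYZ".toList
  let counts :=
    (PySem.Chars.upper str.toList).foldl
      (fun d ch => if d.contains ch then d.insert ch (d.getD ch 0 + 1) else d)
      (LETTERS.foldl (fun d c => d.insert c 0) PySem.Dict.empty)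
  let order := PySem.List.sorted LETTERS
    (fun l => 26 * counts.getD l 0 + PySem.Chars.find ETAOIN [l]) true
  let score : Int := 0
  let score := (PySem.List.slice ETAOIN none (some 6)).foldl
    (fun sc commonLetter =>
      if PySem.Chars.isIn [commonLetter] (PySem.List.slice order none (some 6)) then sc + 1 else sc) score
  let score := (PySem.List.slice ETAOIN (some (-6)) none).foldl
    (fun sc uncommonLetter =>
      if PySem.Chars.isIn [uncommonLetter] (PySem.List.slice order (some (-6)) none) then sc + 1 else sc) score
  score

-- ===== PRECONDITION & SPEC =====
def Spec_frequencyMatchScore (str : String) (out : Int) : Prop := out = frequencyMatchScore_alt str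
instance (str : String) (out : Int) : Decidable (Spec_frequencyMatchScore str out) := by unfold Spec_frequencyMatchScore; infer_instance

-- ===== CLAIM (what is proved, stated in full; the proofs are below) =====
def Claim_equal_frequencyMatchScore : Prop := ∀ (str : String), Dom_frequencyMatchScore str → Spec_frequencyMatchScore str (frequencyMatchScore str)

-- ===== LEMMAS AND PROOFS =====

def pvLetters : List Char := "ABCDEFGHIJKLMNOPQRSTUVWXYZ".toList
def pvEtaoin : List Char := "ETAOINSHRDLCUMWFGYPBVKJXQZ".toList

-- the common scoring tail of both programs, as a function of the frequency-ordered alphabet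
def pvScore (xs : List Char) : Int :=
  (PySem.List.slice pvEtaoin (some (-6)) none).foldl
    (fun sc c => if PySem.Chars.isIn [c] (PySem.List.slice xs (some (-6)) none) then sc + 1 else sc)
    ((PySem.List.slice pvEtaoin none (some 6)).foldl
      (fun sc c => if PySem.Chars.isIn [c] (PySem.List.slice xs none (some 6)) then sc + 1 else sc) 0)

-- A's sign_count_string
def pvD1 (str : String) : PySem.Dict Int (List Char) :=
  pvLetters.foldl (fun d letter =>
    if d.contains ((countingItem str).getD letter 0) = false then
      d.insert ((countingItem str).getD letter 0) [letter]
    else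
      d.modify ((countingItem str).getD letter 0) [] (fun v => v ++ [letter])) PySem.Dict.empty

def pvSCS (str : String) : List Char :=
  (PySem.List.sorted
    (((pvD1 str).keys.foldl
      (fun d freq => d.insert freq (PySem.List.sorted (d.getD freq []) (fun c => PySem.Chars.find pvEtaoin [c]) true))
      (pvD1 str)).items)
    (fun x => x.1) true).foldl (fun acc next => acc ++ next.2) []

-- B's counts dict and order
def pvCounts (str : String) : PySem.Dict Char Int :=
  (PySem.Chars.upper str.toList).foldl
    (fun d ch => if d.contains ch then d.insert ch (d.getD ch 0 + 1) else d)
    (pvLetters.foldl (fun d c => d.insert c 0) PySem.Dict.empty)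

def pvOrder (str : String) : List Char :=
  PySem.List.sorted pvLetters
    (fun l => 26 * (pvCounts str).getD l 0 + PySem.Chars.find pvEtaoin [l]) true

lemma pv_guard_letters : ∀ l ∈ pvLetters, ¬(l.toNat < 65 ∨ (90 < l.toNat ∧ l.toNat < 97) ∨ 122 < l.toNat) := by
  have h : (pvLetters.all (fun l => !decide (l.toNat < 65 ∨ (90 < l.toNat ∧ l.toNat < 97) ∨ 122 < l.toNat))) = true := rfl
  intro l hl
  have h2 := List.all_eq_true.mp h l hl
  simp at h2
  omega

lemma pv_upper_singleton (w : Char) : PySem.Chars.upper [w] = [PySem.Chars.upperChar w] := by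
  simp [PySem.Chars.upper]

lemma pv_countA_aux (l : Char) (hl : l ∈ pvLetters) : ∀ (cs : List Char) (d : PySem.Dict Char Int),
    (cs.foldl (fun d word =>
      (PySem.Chars.upper [word]).foldl (fun d letter =>
        if letter.toNat < 65 ∨ (90 < letter.toNat ∧ letter.toNat < 97) ∨ 122 < letter.toNat then d
        else d.modify letter 0 (· + 1)) d) d).getD l 0
    = d.getD l 0 + (cs.countP (fun w => PySem.Chars.upperChar w == l) : Int) := by
  intro cs
  induction cs with
  | nil => intro d; simp
  | cons c cs ih =>
    intro d
    rw [List.foldl_cons, pv_upper_singleton, List.foldl_cons, List.foldl_nil, ih]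
    by_cases hg : (PySem.Chars.upperChar c).toNat < 65 ∨ (90 < (PySem.Chars.upperChar c).toNat ∧ (PySem.Chars.upperChar c).toNat < 97) ∨ 122 < (PySem.Chars.upperChar c).toNat
    · have hne : (PySem.Chars.upperChar c == l) = false := by
        rcases eq_or_ne (PySem.Chars.upperChar c) l with h | h
        · exact absurd hg (h ▸ pv_guard_letters l hl)
        · simp [h]
      rw [if_pos hg]
      simp [hne]
    · rw [if_neg hg]
      simp only [PySem.Dict.modify]
      by_cases hul : PySem.Chars.upperChar c = l
      · rw [hul, PySem.Dict.getD_insert_self]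
        simp [hul]
        ring
      · rw [PySem.Dict.getD_insert_of_ne _ _ _ (Ne.symm hul)]
        simp [hul]

lemma pv_init_getD : ∀ l ∈ pvLetters,
    ("ABCDEFGHIJKLMNOPQRSTUVWXYZ".toList.foldl (fun d c => d.insert c 0) (PySem.Dict.empty : PySem.Dict Char Int)).getD l 0 = 0 := by
  have h : (pvLetters.all (fun l =>
      ("ABCDEFGHIJKLMNOPQRSTUVWXYZ".toList.foldl (fun d c => d.insert c 0) (PySem.Dict.empty : PySem.Dict Char Int)).getD l 0 == 0)) = true := rfl
  simpa [List.all_eq_true] using h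

lemma pv_countA (str : String) (l : Char) (hl : l ∈ pvLetters) :
    (countingItem str).getD l 0 = (str.toList.countP (fun w => PySem.Chars.upperChar w == l) : Int) := by
  simp only [countingItem]
  rw [pv_countA_aux l hl, pv_init_getD l hl, zero_add]

lemma pv_initB_keys :
    (("ABCDEFGHIJKLMNOPQRSTUVWXYZ".toList.foldl (fun d c => d.insert c 0) (PySem.Dict.empty : PySem.Dict Char Int))).keys = pvLetters := rfl

lemma pv_initB_getD : ∀ l ∈ pvLetters,
    ("ABCDEFGHIJKLMNOPQRSTUVWXYZ".toList.foldl (fun d c => d.insert c 0) (PySem.Dict.empty : PySem.Dict Char Int)).getD l 0 = 0 := by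
  have h : (pvLetters.all (fun l =>
      ("ABCDEFGHIJKLMNOPQRSTUVWXYZ".toList.foldl (fun d c => d.insert c 0) (PySem.Dict.empty : PySem.Dict Char Int)).getD l 0 == 0)) = true := rfl
  simpa [List.all_eq_true] using h

lemma pv_countB_aux (l : Char) (hl : l ∈ pvLetters) : ∀ (cs : List Char) (d : PySem.Dict Char Int), d.keys = pvLetters →
    (cs.foldl (fun d ch => if d.contains ch then d.insert ch (d.getD ch 0 + 1) else d) d).getD l 0
      = d.getD l 0 + (cs.countP (fun ch => ch == l) : Int) := by
  intro cs
  induction cs with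
  | nil => intro d _; simp
  | cons c cs ih =>
    intro d hk
    rw [List.foldl_cons]
    by_cases hc : d.contains c
    · rw [if_pos hc, ih _ (by rw [PySem.Dict.keys_insert_of_contains d _ hc, hk])]
      by_cases hcl : c = l
      · subst hcl
        rw [PySem.Dict.getD_insert_self]
        simp
        ring
      · rw [PySem.Dict.getD_insert_of_ne _ _ _ (Ne.symm hcl)]
        simp [hcl]
    · rw [if_neg hc, ih _ hk]
      have hcl : (c == l) = false := by
        have : c ∉ d.keys := fun hm => hc ((PySem.Dict.contains_iff_mem_keys d c).mpr hm)
        rw [hk] at this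
        have : c ≠ l := fun h => this (h ▸ hl)
        simp [this]
      simp [hcl]

lemma pv_countB (str : String) (l : Char) (hl : l ∈ pvLetters) :
    ((PySem.Chars.upper str.toList).foldl
      (fun d ch => if d.contains ch then d.insert ch (d.getD ch 0 + 1) else d)
      ("ABCDEFGHIJKLMNOPQRSTUVWXYZ".toList.foldl (fun d c => d.insert c 0) PySem.Dict.empty)).getD l 0
      = (str.toList.countP (fun w => PySem.Chars.upperChar w == l) : Int) := by
  rw [pv_countB_aux l hl _ _ pv_initB_keys, pv_initB_getD l hl, zero_add]
  have hu : PySem.Chars.upper str.toList = str.toList.map PySem.Chars.upperChar := by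
    simp [PySem.Chars.upper]
  rw [hu, List.countP_map]
  rfl

-- the first loop's branch IS Dict.modify
lemma pv_stepA_eq (d : PySem.Dict Int (List Char)) (k : Int) (x : Char) :
    (if d.contains k = false then d.insert k [x] else d.modify k [] (fun v => v ++ [x]))
      = d.modify k [] (fun v => v ++ [x]) := by
  by_cases h : d.contains k
  · simp [h]
  · simp [h, PySem.Dict.modify, PySem.Dict.getD_of_not_contains]

-- d1 characterisation
lemma pv_d1_eq (cnt : Char → Int) :
    pvLetters.foldl (fun d letter =>
      if d.contains (cnt letter) = false then d.insert (cnt letter) [letter]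
      else d.modify (cnt letter) [] (fun v => v ++ [letter])) (PySem.Dict.empty : PySem.Dict Int (List Char))
    = (pvLetters.map (fun l => (cnt l, l))).foldl (fun d p => d.modify p.1 [] (fun v => v ++ [p.2])) PySem.Dict.empty := by
  rw [List.foldl_map]
  apply PySem.List.foldl_congr_mem
  intro d l _
  exact pv_stepA_eq d (cnt l) l

lemma pv_d1_getD (cnt : Char → Int) (c : Int) :
    (pvLetters.foldl (fun d letter =>
      if d.contains (cnt letter) = false then d.insert (cnt letter) [letter]
      else d.modify (cnt letter) [] (fun v => v ++ [letter])) (PySem.Dict.empty : PySem.Dict Int (List Char))).getD c []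
    = pvLetters.filter (fun x => cnt x == c) := by
  rw [pv_d1_eq, PySem.Dict.getD_foldl_modify_append]
  simp [List.filter_map, Function.comp_def]

lemma pv_d1_keys (cnt : Char → Int) :
    (pvLetters.foldl (fun d letter =>
      if d.contains (cnt letter) = false then d.insert (cnt letter) [letter]
      else d.modify (cnt letter) [] (fun v => v ++ [letter])) (PySem.Dict.empty : PySem.Dict Int (List Char))).keys
    = PySem.Set.ofList (pvLetters.map cnt) := by
  rw [pv_d1_eq, List.foldl_map]
  have h := PySem.Dict.keys_foldl_modify_key pvLetters cnt ([] : List Char)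
    (fun _ l => fun v => v ++ [l]) (PySem.Dict.empty : PySem.Dict Int (List Char))
  exact h

lemma pv_getD_foldl_insert_not_mem {κ ν : Type} [BEq κ] [LawfulBEq κ] (g : ν → ν) (d0 : ν)
    (ks : List κ) (k : κ) (hk : k ∉ ks) : ∀ d : PySem.Dict κ ν,
    (ks.foldl (fun d k' => d.insert k' (g (d.getD k' d0))) d).getD k d0 = d.getD k d0 := by
  induction ks with
  | nil => intro d; rfl
  | cons a ks ih =>
    intro d
    rw [List.foldl_cons, ih (fun h => hk (List.mem_cons_of_mem a h)),
      PySem.Dict.getD_insert_of_ne _ _ _ (fun h : k = a => hk (h ▸ List.mem_cons_self ..))]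

lemma pv_getD_foldl_insert_mem {κ ν : Type} [BEq κ] [LawfulBEq κ] (g : ν → ν) (d0 : ν)
    (ks : List κ) (hnd : ks.Nodup) (k : κ) (hk : k ∈ ks) : ∀ d : PySem.Dict κ ν,
    (ks.foldl (fun d k' => d.insert k' (g (d.getD k' d0))) d).getD k d0 = g (d.getD k d0) := by
  induction ks with
  | nil => exact absurd hk (List.not_mem_nil)
  | cons a ks ih =>
    intro d
    rw [List.foldl_cons]
    rcases List.mem_cons.mp hk with h | h
    · subst h
      rw [pv_getD_foldl_insert_not_mem g d0 ks k (List.Nodup.notMem hnd), PySem.Dict.getD_insert_self]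
    · rw [ih (List.Nodup.of_cons hnd) h]
      congr 1
      exact PySem.Dict.getD_insert_of_ne _ _ _ (fun he => (List.Nodup.notMem hnd) (he ▸ h))

lemma pv_set_update_self {α : Type} [BEq α] [LawfulBEq α] (s : PySem.Set α) :
    ∀ l : List α, (∀ x ∈ l, x ∈ s) → PySem.Set.update s l = s := by
  intro l
  induction l with
  | nil => intro _; rfl
  | cons a l ih =>
    intro h
    have hmem : a ∈ s := h a (List.mem_cons_self ..)
    have ha : PySem.Set.add s a = s := by
      simp [PySem.Set.add, List.contains_eq_mem, hmem]
    show PySem.Set.update (PySem.Set.add s a) l = s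
    rw [ha]
    exact ih (fun x hx => h x (List.mem_cons_of_mem a hx))
lemma pv_letters_nodup : pvLetters.Nodup := by
  have h : (pvLetters.all (fun a => pvLetters.count a == 1)) = true := rfl
  rw [List.nodup_iff_count_le_one]
  intro a
  by_cases ha : a ∈ pvLetters
  · have := List.all_eq_true.mp h a ha
    simp at this
    omega
  · simp [List.count_eq_zero_of_not_mem ha]

lemma pv_find_bounds : ∀ l ∈ pvLetters, 0 ≤ PySem.Chars.find pvEtaoin [l] ∧ PySem.Chars.find pvEtaoin [l] < 26 := by
  have h : (pvLetters.all (fun l => decide (0 ≤ PySem.Chars.find pvEtaoin [l] ∧ PySem.Chars.find pvEtaoin [l] < 26))) = true := rfl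
  intro l hl
  simpa using List.all_eq_true.mp h l hl

lemma pv_find_inj : ∀ a ∈ pvLetters, ∀ b ∈ pvLetters, a ≠ b →
    PySem.Chars.find pvEtaoin [a] ≠ PySem.Chars.find pvEtaoin [b] := by
  have h : (pvLetters.all (fun a => pvLetters.all (fun b =>
      a == b || PySem.Chars.find pvEtaoin [a] != PySem.Chars.find pvEtaoin [b]))) = true := rfl
  intro a ha b hb hne
  have h2 := List.all_eq_true.mp (List.all_eq_true.mp h a ha) b hb
  simp [hne] at h2
  exact h2

lemma pv_sum_ite (x : Int) (n : Nat) : ∀ ks : List Int, ks.Nodup →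
    (ks.map (fun c => if x = c then n else 0)).sum = if x ∈ ks then n else 0 := by
  intro ks
  induction ks with
  | nil => simp
  | cons a ks ih =>
    intro hnd
    rw [List.map_cons, List.sum_cons, ih hnd.of_cons]
    by_cases hx : x = a
    · subst hx
      simp [List.Nodup.notMem hnd]
    · simp [hx, List.mem_cons]

lemma pv_count_filter_bucket (l : List Char) (f : Char → Int) (a : Char) (c : Int) :
    (l.filter (fun x => f x == c)).count a = if f a = c then l.count a else 0 := by
  by_cases h : f a = c
  · rw [List.count_filter (by simp [h]), if_pos h]
  · rw [if_neg h, List.count_eq_zero_of_not_mem]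
    intro hm
    exact h (by simpa using (List.mem_filter.mp hm).2)

lemma pv_partition_perm (l : List Char) (f : Char → Int) :
    ((PySem.Set.ofList (l.map f)).map (fun c => l.filter (fun x => f x == c))).flatten.Perm l := by
  rw [List.perm_iff_count]
  intro a
  rw [List.count_flatten, List.map_map]
  have h1 : ((PySem.Set.ofList (l.map f)).map (List.count a ∘ fun c => l.filter (fun x => f x == c))).sum
      = ((PySem.Set.ofList (l.map f)).map (fun c => if f a = c then l.count a else 0)).sum := by
    congr 1
    exact List.map_congr_left (fun c _ => pv_count_filter_bucket l f a c)
  rw [h1, pv_sum_ite _ _ _ (PySem.Set.nodup_ofList _)]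
  by_cases ha : a ∈ l
  · rw [if_pos ((PySem.Set.mem_ofList _ _).mpr (List.mem_map_of_mem ha))]
  · rw [List.count_eq_zero_of_not_mem ha]
    simp

lemma pv_flatten_sorted_perm (key : Char → Int) (bucket : Int → List Char) : ∀ ks : List Int,
    (ks.map (fun k => PySem.List.sorted (bucket k) key true)).flatten.Perm ((ks.map bucket).flatten) := by
  intro ks
  induction ks with
  | nil => simp
  | cons a ks ih =>
    simp only [List.map_cons, List.flatten_cons]
    exact List.Perm.append (PySem.List.sorted_perm _ _ _) ih

set_option maxHeartbeats 1000000 in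
lemma pv_core (cnt : Char → Int) (key2 : Char → Int)
    (hkey : ∀ a ∈ pvLetters, key2 a = 26 * cnt a + PySem.Chars.find pvEtaoin [a]) :
    (PySem.List.sorted
      (((pvLetters.foldl (fun d letter =>
          if d.contains (cnt letter) = false then d.insert (cnt letter) [letter]
          else d.modify (cnt letter) [] (fun v => v ++ [letter])) (PySem.Dict.empty : PySem.Dict Int (List Char))).keys.foldl
        (fun d freq => d.insert freq (PySem.List.sorted (d.getD freq []) (fun c => PySem.Chars.find pvEtaoin [c]) true))
        (pvLetters.foldl (fun d letter =>
          if d.contains (cnt letter) = false then d.insert (cnt letter) [letter]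
          else d.modify (cnt letter) [] (fun v => v ++ [letter])) (PySem.Dict.empty : PySem.Dict Int (List Char)))).items)
      (fun x => x.1) true).foldl (fun acc next => acc ++ next.2) []
    = PySem.List.sorted pvLetters key2 true := by
  set fk : Char → Int := fun c => PySem.Chars.find pvEtaoin [c] with hfk
  set d1 : PySem.Dict Int (List Char) := pvLetters.foldl (fun d letter =>
      if d.contains (cnt letter) = false then d.insert (cnt letter) [letter]
      else d.modify (cnt letter) [] (fun v => v ++ [letter])) PySem.Dict.empty with hd1
  set d2 : PySem.Dict Int (List Char) := d1.keys.foldl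
      (fun d freq => d.insert freq (PySem.List.sorted (d.getD freq []) fk true)) d1 with hd2
  have hkeys1 : d1.keys = PySem.Set.ofList (pvLetters.map cnt) := pv_d1_keys cnt
  have hnd1 : d1.keys.Nodup := by rw [hkeys1]; exact PySem.Set.nodup_ofList _
  have hkeys2 : d2.keys = d1.keys := by
    rw [hd2]
    have h := PySem.Dict.keys_foldl_insert_key d1.keys (fun x => x)
      (fun d x => PySem.List.sorted (d.getD x []) fk true) d1
    simp only [List.map_id'] at h
    rw [h]
    exact pv_set_update_self d1.keys d1.keys (fun x hx => hx)
  have hnd2 : d2.keys.Nodup := by rw [hkeys2]; exact hnd1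
  have hgetD2 : ∀ k ∈ d1.keys, d2.getD k [] = PySem.List.sorted (pvLetters.filter (fun x => cnt x == k)) fk true := by
    intro k hk
    rw [hd2, pv_getD_foldl_insert_mem (fun v => PySem.List.sorted v fk true) [] d1.keys hnd1 k hk]
    rw [hd1, pv_d1_getD]
  have hitems : d2.items = d1.keys.map (fun k => (k, PySem.List.sorted (pvLetters.filter (fun x => cnt x == k)) fk true)) := by
    rw [PySem.Dict.items_eq_map_keys d2 hnd2 [], hkeys2]
    exact List.map_congr_left (fun k hk => by rw [hgetD2 k hk])
  -- the concatenation is the flatten of the sorted pairs' buckets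
  have hflat : List.foldl (fun acc (next : Int × List Char) => acc ++ next.2) []
      (PySem.List.sorted d2.items (fun x => x.1) true)
      = ((PySem.List.sorted d2.items (fun x => x.1) true).map (fun p => p.2)).flatten := by
    simp only [PySem.List.foldl_append_eq_flatMap, List.nil_append, List.flatMap_def]
  rw [hflat]
  set ys := PySem.List.sorted d2.items (fun x => x.1) true with hys
  have hysperm : ys.Perm d2.items := PySem.List.sorted_perm _ _ _
  have hmem_ys : ∀ p ∈ ys, p.1 ∈ d1.keys ∧
      p.2 = PySem.List.sorted (pvLetters.filter (fun x => cnt x == p.1)) fk true := by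
    intro p hp
    have hp2 : p ∈ d2.items := (PySem.List.mem_sorted _ _ _ _).mp hp
    rw [hitems] at hp2
    obtain ⟨k, hk, he⟩ := List.mem_map.mp hp2
    constructor
    · rw [← he]; exact hk
    · rw [← he]
  have hbucket_mem : ∀ p ∈ ys, ∀ x ∈ p.2, x ∈ pvLetters ∧ cnt x = p.1 := by
    intro p hp x hx
    rw [(hmem_ys p hp).2] at hx
    have := (PySem.List.mem_sorted _ _ _ _).mp hx
    have h2 := List.mem_filter.mp this
    exact ⟨h2.1, by simpa using h2.2⟩
  -- strict ordering of the pairs by frequency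
  have h1 : List.Pairwise (fun p q : Int × List Char => q.1 ≤ p.1) ys := PySem.List.sorted_pairwise_rev _ _
  have hnodup_fst : (ys.map (fun p => p.1)).Nodup := by
    have hp : (ys.map (fun p => p.1)).Perm (d2.items.map (fun p => p.1)) := hysperm.map _
    have : (d2.items.map (fun p => p.1)).Nodup := hnd2
    exact hp.nodup_iff.mpr this
  have h2 : List.Pairwise (fun p q : Int × List Char => p.1 ≠ q.1) ys := by
    have := hnodup_fst
    rw [List.Nodup, List.pairwise_map] at this
    exact this
  have hstrict : List.Pairwise (fun p q : Int × List Char => q.1 < p.1) ys :=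
    (h1.and h2).imp (fun ⟨hle, hne⟩ => lt_of_le_of_ne hle (Ne.symm hne))
  -- permutation with the alphabet
  have hperm : (ys.map (fun p => p.2)).flatten.Perm pvLetters := by
    have hA : ((ys.map (fun p => p.2)).flatten).Perm ((d2.items.map (fun p => p.2)).flatten) :=
      (hysperm.map _).flatten
    have hB : d2.items.map (fun p => p.2)
        = d1.keys.map (fun k => PySem.List.sorted (pvLetters.filter (fun x => cnt x == k)) fk true) := by
      rw [hitems, List.map_map]
      rfl
    refine hA.trans ?_
    rw [hB]
    refine (pv_flatten_sorted_perm fk (fun k => pvLetters.filter (fun x => cnt x == k)) d1.keys).trans ?_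
    rw [hkeys1]
    exact pv_partition_perm pvLetters cnt
  -- strict pairwise decrease of the combined key along the concatenation
  have hPA : List.Pairwise (fun a b => 26 * cnt b + fk b < 26 * cnt a + fk a) (ys.map (fun p => p.2)).flatten := by
    rw [List.pairwise_flatten]
    constructor
    · intro bl hbl
      obtain ⟨p, hp, he⟩ := List.mem_map.mp hbl
      have hmemb : ∀ x ∈ bl, x ∈ pvLetters ∧ cnt x = p.1 := fun x hx => hbucket_mem p hp x (he ▸ hx)
      have hple : List.Pairwise (fun a b => fk b ≤ fk a) bl := by
        rw [← he, (hmem_ys p hp).2]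
        exact PySem.List.sorted_pairwise_rev _ _
      have hnd : bl.Nodup := by
        rw [← he, (hmem_ys p hp).2]
        exact ((PySem.List.sorted_perm _ _ _).nodup_iff).mpr (pv_letters_nodup.filter _)
      have hne : List.Pairwise (fun a b : Char => a ≠ b) bl := hnd
      refine ((hple.and hne).imp_of_mem ?_)
      intro a b ha hb ⟨hle, hab⟩
      obtain ⟨haL, hac⟩ := hmemb a ha
      obtain ⟨hbL, hbc⟩ := hmemb b hb
      have : fk b ≠ fk a := pv_find_inj b hbL a haL (Ne.symm hab)
      have : fk b < fk a := lt_of_le_of_ne hle this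
      omega
    · rw [List.pairwise_map]
      refine hstrict.imp_of_mem ?_
      intro p q hp hq hlt x hx y hy
      obtain ⟨hxL, hxc⟩ := hbucket_mem p hp x hx
      obtain ⟨hyL, hyc⟩ := hbucket_mem q hq y hy
      have hbx := pv_find_bounds x hxL
      have hby := pv_find_bounds y hyL
      simp only [hfk]
      omega
  -- conclude with the named sorted order
  have hPW : List.Pairwise (fun a b => key2 b < key2 a) ((ys.map (fun p => p.2)).flatten) := by
    refine hPA.imp_of_mem ?_
    intro a b ha hb hlt
    have haL : a ∈ pvLetters := hperm.subset ha
    have hbL : b ∈ pvLetters := hperm.subset hb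
    simp only [hfk] at hlt
    rw [hkey a haL, hkey b hbL]
    exact hlt
  clear_value ys d2 d1
  exact (PySem.List.sorted_rev_eq_of_perm_of_pairwise_gt pvLetters
    ((ys.map (fun p => p.2)).flatten) key2 hperm hPW).symm


lemma pv_countA' (str : String) (a : Char) (ha : a ∈ pvLetters) :
    (countingItem str).getD a 0 = (str.toList.countP (fun w => PySem.Chars.upperChar w == a) : Int) :=
  pv_countA str a ha

lemma pv_countB' (str : String) (a : Char) (ha : a ∈ pvLetters) :
    (pvCounts str).getD a 0 = (str.toList.countP (fun w => PySem.Chars.upperChar w == a) : Int) :=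
  pv_countB str a ha

lemma pv_main (str : String) : pvSCS str = pvOrder str := by
  have hkey : ∀ a ∈ pvLetters,
      (fun l => 26 * (pvCounts str).getD l 0 + PySem.Chars.find pvEtaoin [l]) a
        = 26 * (fun l => (countingItem str).getD l 0) a + PySem.Chars.find pvEtaoin [a] := by
    intro a ha
    simp only
    rw [pv_countB' str a ha, pv_countA' str a ha]
  exact pv_core (fun l => (countingItem str).getD l 0)
    (fun l => 26 * (pvCounts str).getD l 0 + PySem.Chars.find pvEtaoin [l]) hkey

lemma pv_A_eq (str : String) : frequencyMatchScore str = pvScore (pvSCS str) := rfl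

lemma pv_B_eq (str : String) : frequencyMatchScore_alt str = pvScore (pvOrder str) := rfl

-- ===== VERDICT (by name: the statement is the Claim_ definition above) =====
theorem frequencyMatchScore_spec : Claim_equal_frequencyMatchScore := by
  intro str _
  unfold Spec_frequencyMatchScore
  rw [pv_A_eq str, pv_B_eq str, pv_main str]
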